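-- pv_equiv track=rewrite | github.com/Sumedh31/algos | python/Sort/Tet1.py | solution
-- ===== SOURCE A (Python) =====
-- def solution(X, Y):
--     # write your code in Python 3.6
--     Mini=0
--     Big=0
--     gotTheBurger=False
--     result=[]
--     for I in range(X):
--         if(X*2==Y):
--             gotTheBurger=True
--             Mini=X*2
--             Big=Big+0
--             break
--         else:
--             X=X-1
--             Y=Y-4
--             Big=Big+1
--     result.append(Mini)
--     result.append(Big)
--     if(gotTheBurger==True):
--         return result
--     else:
--         return [-1,-1]
-- ===== SOURCE B (Python) =====
-- def solution(X, Y):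
--     # closed form: after k decrements the check is 2*(X-k) == Y-4*k, i.e. 2*k == Y-2*X
--     d = Y - 2 * X
--     if d >= 0 and d % 2 == 0 and d // 2 < X:
--         k = d // 2
--         return [2 * (X - k), k]
--     return [-1, -1]
-- ===== Notes on version B (the rewrite author's own statement) =====
-- stated objective: faster
-- what changed: B solves 2*(X-k)==Y-4*k algebraically (k=(Y-2X)/2, checked for integrality and 0<=k<X) instead of A's step-by-step decrement loop.
import Mathlib
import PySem

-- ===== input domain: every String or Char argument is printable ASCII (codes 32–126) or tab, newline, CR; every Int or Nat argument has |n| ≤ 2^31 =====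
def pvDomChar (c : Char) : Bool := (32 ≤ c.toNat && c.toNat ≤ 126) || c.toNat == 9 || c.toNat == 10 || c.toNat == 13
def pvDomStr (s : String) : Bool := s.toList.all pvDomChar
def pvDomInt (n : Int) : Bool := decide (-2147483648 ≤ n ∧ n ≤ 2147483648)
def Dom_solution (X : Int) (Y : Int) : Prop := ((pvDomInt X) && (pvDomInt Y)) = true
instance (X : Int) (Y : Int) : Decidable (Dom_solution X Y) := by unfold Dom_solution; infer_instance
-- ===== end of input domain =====

-- B replaces A's O(X) decrement loop by the O(1) algebraic solution k = (Y-2X)/2; objective: faster (asymptotic).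

-- ===== PORT A =====
-- A's 'for I in range(X)' loop with break; state = (current X, current Y, Mini, Big, gotTheBurger).
def solutionLoop (l : List Int) (X Y Mini Big : Int) (got : Bool) : Int × Int × Bool :=
  match l with
  | [] => (Mini, Big, got)
  | _ :: rest =>
    if X * 2 = Y then (X * 2, Big + 0, true)
    else solutionLoop rest (X - 1) (Y - 4) Mini (Big + 1) got

def solution (X : Int) (Y : Int) : List Int :=
  let s := solutionLoop (PySem.List.pyRange 0 X 1) X Y 0 0 false
  let result := [s.1, s.2.1]
  if s.2.2 = true then result else [-1, -1]

-- ===== PORT B =====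
def solution_alt (X : Int) (Y : Int) : List Int :=
  let d := Y - 2 * X
  if d ≥ 0 ∧ PySem.Int.mod d 2 = 0 ∧ PySem.Int.floordiv d 2 < X then
    let k := PySem.Int.floordiv d 2
    [2 * (X - k), k]
  else [-1, -1]

-- ===== PRECONDITION & SPEC =====
def Spec_solution (X : Int) (Y : Int) (out : List Int) : Prop := out = solution_alt X Y
instance (X : Int) (Y : Int) (out : List Int) : Decidable (Spec_solution X Y out) := by unfold Spec_solution; infer_instance

-- ===== CLAIM (what is proved, stated in full; the proofs are below) =====
def Claim_equal_solution : Prop := ∀ (X : Int) (Y : Int), Dom_solution X Y → Spec_solution X Y (solution X Y)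

-- ===== LEMMAS AND PROOFS =====

-- Closed form of A's loop: with d = Y - 2X, the loop succeeds at step k = d/2 iff d is
-- even, nonnegative and d/2 < number of iterations; only the list's LENGTH matters.
theorem solutionLoop_char (l : List Int) (X Y Big : Int) :
    solutionLoop l X Y 0 Big false =
      if 0 ≤ Y - 2*X ∧ (Y - 2*X) % 2 = 0 ∧ (Y - 2*X)/2 < (l.length : Int) then
        (2*X - (Y - 2*X), Big + (Y - 2*X)/2, true)
      else (0, Big + (l.length : Int), false) := by
  induction l generalizing X Y Big with
  | nil => simp [solutionLoop]; omega
  | cons a rest ih =>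
    simp only [solutionLoop]
    by_cases h : X * 2 = Y
    · rw [if_pos h]
      have : (0 ≤ Y - 2*X ∧ (Y - 2*X) % 2 = 0 ∧ (Y - 2*X)/2 < ((a :: rest).length : Int)) := by
        simp; omega
      rw [if_pos this]
      have h0 : Y - 2*X = 0 := by omega
      simp [h0]; omega
    · rw [if_neg h, ih]
      have hd : (Y - 4) - 2*(X - 1) = (Y - 2*X) - 2 := by ring
      rw [hd]
      by_cases hc : 0 ≤ Y - 2*X - 2 ∧ (Y - 2*X - 2) % 2 = 0 ∧ (Y - 2*X - 2)/2 < (rest.length : Int)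
      · rw [if_pos hc]
        have : (0 ≤ Y - 2*X ∧ (Y - 2*X) % 2 = 0 ∧ (Y - 2*X)/2 < ((a :: rest).length : Int)) := by
          simp only [List.length_cons]; push_cast; omega
        rw [if_pos this]
        simp only [Prod.mk.injEq]
        exact ⟨by omega, by omega, trivial⟩
      · rw [if_neg hc]
        have : ¬ (0 ≤ Y - 2*X ∧ (Y - 2*X) % 2 = 0 ∧ (Y - 2*X)/2 < ((a :: rest).length : Int)) := by
          simp only [List.length_cons]; push_cast; omega
        rw [if_neg this]
        simp only [Prod.mk.injEq, List.length_cons]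
        exact ⟨trivial, by push_cast; omega, trivial⟩

-- ===== VERDICT (by name: the statement is the Claim_ definition above) =====
theorem solution_spec : Claim_equal_solution := by
  intro X Y _
  unfold Spec_solution solution solution_alt
  rw [solutionLoop_char]
  have hlen : ((PySem.List.pyRange 0 X 1).length : Int) = max X 0 := by
    rw [PySem.List.length_pyRange_one]; omega
  rw [hlen]
  simp only [PySem.Int.mod, PySem.Int.floordiv]
  by_cases hc : 0 ≤ Y - 2*X ∧ (Y - 2*X) % 2 = 0 ∧ (Y - 2*X)/2 < max X 0
  · rw [if_pos hc]
    have hc' : (Y - 2*X ≥ 0 ∧ (Y - 2*X).fmod 2 = 0 ∧ (Y - 2*X).fdiv 2 < X) := by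
      rw [Int.fmod_eq_emod_of_nonneg _ (by omega), Int.fdiv_eq_ediv_of_nonneg _ (by omega)]; omega
    rw [if_pos hc']
    obtain ⟨h1, h2, h3⟩ := hc'
    dsimp only
    rw [if_pos rfl, Int.fdiv_eq_ediv_of_nonneg _ (by omega : (0:Int) ≤ 2)]
    have he : 2 * X - (Y - 2 * X) = 2 * (X - (Y - 2 * X) / 2) := by omega
    have hz : 0 + (Y - 2 * X) / 2 = (Y - 2 * X) / 2 := by omega
    rw [he, hz]
  · rw [if_neg hc]
    have hc' : ¬ (Y - 2*X ≥ 0 ∧ (Y - 2*X).fmod 2 = 0 ∧ (Y - 2*X).fdiv 2 < X) := by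
      intro ⟨h1, h2, h3⟩
      rw [Int.fmod_eq_emod_of_nonneg _ (by omega), Int.fdiv_eq_ediv_of_nonneg _ (by omega)] at *; omega
    rw [if_neg hc']
    simp
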